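-- pv_equiv track=rewrite | github.com/mjrenfro/AdventOfCode | 16/Day1.py | fill_disk
-- ===== SOURCE A (Python) =====
-- import copy
--
-- def fill_disk(data, goal):
--     while True:
--         a = data
--         b=copy.deepcopy(a)
--         b.reverse()
--         data=a+[0]+[x^1 for x in b]
--         if len(data)>=goal:
--             return data[:goal]
-- ===== SOURCE B (Python) =====
-- def _bit(data, k, s, j, parity):
--     # value at index j of the k-th dragon expansion of data (which has size s),
--     # with an accumulated invert-parity
--     if k == 0:
--         return data[j] ^ parity
--     m = (s - 1) // 2
--     if j == m:
--         return parity
--     if j > m: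
--         return _bit(data, k - 1, m, 2 * m - j, parity ^ 1)
--     return _bit(data, k - 1, m, j, parity)
--
-- def fill_disk(data, goal):
--     n = len(data)
--     out = []
--     for i in range(goal):
--         k, s = 0, n
--         while s <= i:
--             k, s = k + 1, 2 * s + 1
--         out.append(_bit(data, k, s, i, 0))
--     return out
-- ===== Notes on version B (the rewrite author's own statement) =====
-- stated objective: alternative
-- what changed: Instead of repeatedly doubling the whole list until it reaches the goal, B computes each output position independently by descending the dragon-curve structure (pivot / mirrored-and-inverted half) down to an original data bit with an accumulated invert parity, using O(1) extra space.
-- intended difference: For goal < 0 with 2*len(data)+1+goal > 0, A performs one doubling pass and then truncates with the negative goal as a Python slice, returning a nonempty prefix of the expansion (e.g. [1,0] for ([1],-1)); B returns [], the intended value for a non-positive requested length. — e.g. on fill_disk([1], -1): A returns [1, 0], B returns []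
import Mathlib
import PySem

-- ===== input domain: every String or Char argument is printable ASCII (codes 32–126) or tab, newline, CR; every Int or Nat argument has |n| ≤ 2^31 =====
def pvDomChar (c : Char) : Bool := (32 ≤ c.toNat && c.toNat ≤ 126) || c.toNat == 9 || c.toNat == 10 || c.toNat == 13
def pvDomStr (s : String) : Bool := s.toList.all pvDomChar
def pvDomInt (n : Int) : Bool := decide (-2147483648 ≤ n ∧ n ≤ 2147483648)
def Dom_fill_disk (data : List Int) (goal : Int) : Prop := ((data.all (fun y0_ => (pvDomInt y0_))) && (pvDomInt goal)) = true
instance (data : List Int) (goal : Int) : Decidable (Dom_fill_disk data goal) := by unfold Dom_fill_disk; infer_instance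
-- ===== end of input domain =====

-- B replaces the whole-list doubling loop by an independent positional descent of the
-- dragon-curve structure for each output index (alternative decomposition, O(1) extra space).

-- ===== PORT A =====
-- one dragon-curve doubling step: data = a + [0] + [x^1 for x in reversed(a)]
def pvExpand (d : List Int) : List Int :=
  d ++ [0] ++ (d.reverse.map (fun x => PySem.Int.bxor x 1))

def fill_disk (data : List Int) (goal : Int) : List Int :=
  if goal ≤ ((pvExpand data).length : Int) then PySem.List.slice (pvExpand data) none (some goal)
  else fill_disk (pvExpand data) goal
termination_by (goal - data.length).toNat
decreasing_by
  simp only [pvExpand, List.length_append, List.length_map, List.length_reverse,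
    List.length_cons, List.length_nil] at *
  omega

-- ===== PORT B =====
-- value at index j of the k-th dragon expansion of data (of size s), with invert parity
def pvBit (data : List Int) : Nat → Nat → Nat → Int → Int
  | 0, _, j, parity => PySem.Int.bxor (data.getD j 0) parity
  | k+1, s, j, parity =>
    let m := (s - 1) / 2
    if j = m then parity
    else if m < j then pvBit data k m (2 * m - j) (PySem.Int.bxor parity 1)
    else pvBit data k m j parity

-- smallest expansion (depth, size) whose size exceeds i
def pvFindKS (i k s : Nat) : Nat × Nat :=
  if s ≤ i then pvFindKS i (k + 1) (2 * s + 1) else (k, s)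
termination_by i + 1 - s
decreasing_by omega

def fill_disk_alt (data : List Int) (goal : Int) : List Int :=
  (List.range goal.toNat).map (fun i =>
    let ks := pvFindKS i 0 data.length
    pvBit data ks.1 ks.2 i 0)

-- ===== PRECONDITION & SPEC =====
-- For goal < 0 with 2*len(data)+1+goal > 0, A performs one doubling pass and then truncates
-- with the negative goal as a Python slice, returning a nonempty prefix of the expansion;
-- B returns [], the intended value for a non-positive requested length.
def D_fill_disk (data : List Int) (goal : Int) : Prop :=
  goal < 0 ∧ 0 < 2 * (data.length : Int) + 1 + goal
instance (data : List Int) (goal : Int) : Decidable (D_fill_disk data goal) := by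
  unfold D_fill_disk; infer_instance

def Spec_fill_disk (data : List Int) (goal : Int) (out : List Int) : Prop :=
  ¬ D_fill_disk data goal → out = fill_disk_alt data goal
instance (data : List Int) (goal : Int) (out : List Int) : Decidable (Spec_fill_disk data goal out) := by
  unfold Spec_fill_disk; infer_instance

def pvDiffWitness_fill_disk : List Int × Int := ([1], -1)
def pvDiffWitnessOut_fill_disk : (List Int) × (List Int) := ([1, 0], [])

-- ===== CLAIM (what is proved, stated in full; the proofs are below) =====
def Claim_unchanged_fill_disk : Prop := ∀ (data : List Int) (goal : Int), Dom_fill_disk data goal → Spec_fill_disk data goal (fill_disk data goal)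
def Claim_changed_fill_disk : Prop := Dom_fill_disk (pvDiffWitness_fill_disk.1) (pvDiffWitness_fill_disk.2) ∧ D_fill_disk (pvDiffWitness_fill_disk.1) (pvDiffWitness_fill_disk.2) ∧ fill_disk (pvDiffWitness_fill_disk.1) (pvDiffWitness_fill_disk.2) = pvDiffWitnessOut_fill_disk.1 ∧ fill_disk_alt (pvDiffWitness_fill_disk.1) (pvDiffWitness_fill_disk.2) = pvDiffWitnessOut_fill_disk.2 ∧ pvDiffWitnessOut_fill_disk.1 ≠ pvDiffWitnessOut_fill_disk.2
def Claim_exact_fill_disk : Prop := ∀ (data : List Int) (goal : Int), Dom_fill_disk data goal → D_fill_disk data goal → fill_disk data goal ≠ fill_disk_alt data goal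

-- ===== LEMMAS AND PROOFS =====
-- k-fold expansion
def pvIter (d : List Int) : Nat → List Int
  | 0 => d
  | k+1 => pvExpand (pvIter d k)

-- the stable value at index j of any sufficiently large expansion
def pvF (d : List Int) (j : Nat) : Int := (pvIter d (j+1)).getD j 0

theorem pvExpand_length (d : List Int) : (pvExpand d).length = 2 * d.length + 1 := by
  simp [pvExpand]; omega

theorem pvIter_length_ge (d : List Int) (k : Nat) : k ≤ (pvIter d k).length := by
  induction k with
  | zero => exact Nat.zero_le _
  | succ k ih => simp only [pvIter, pvExpand_length]; omega

theorem pvIter_prefix_succ (d : List Int) (k : Nat) : pvIter d k <+: pvIter d (k+1) :=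
  ⟨[0] ++ ((pvIter d k).reverse.map (fun x => PySem.Int.bxor x 1)), by simp [pvIter, pvExpand]⟩

theorem pvIter_prefix (d : List Int) {k m : Nat} (h : k ≤ m) : pvIter d k <+: pvIter d m := by
  induction m with
  | zero => simp [Nat.le_zero.mp h]
  | succ m ih =>
    rcases Nat.lt_or_ge k (m+1) with h' | h'
    · exact (ih (Nat.lt_succ_iff.mp h')).trans (pvIter_prefix_succ d m)
    · have : k = m + 1 := Nat.le_antisymm h h'
      simp [this]

theorem getD_of_prefix {xs ys : List Int} (h : xs <+: ys) {j : Nat} (hj : j < xs.length) :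
    ys.getD j 0 = xs.getD j 0 := by
  rcases h with ⟨t, rfl⟩
  simp [List.getD, List.getElem?_append_left hj]

theorem pvStable (d : List Int) {k j : Nat} (hj : j < (pvIter d k).length) :
    (pvIter d k).getD j 0 = pvF d j := by
  unfold pvF
  have hj' : j < (pvIter d (j+1)).length :=
    Nat.lt_of_lt_of_le (Nat.lt_succ_self j) (pvIter_length_ge d (j+1))
  rcases Nat.le_total k (j+1) with h | h
  · rw [getD_of_prefix (pvIter_prefix d h) hj]
  · rw [getD_of_prefix (pvIter_prefix d h) hj']

theorem pvIter_expand (d : List Int) (k : Nat) : pvIter (pvExpand d) k = pvIter d (k+1) := by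
  induction k with
  | zero => rfl
  | succ k ih => simp only [pvIter, ih]

theorem pvF_expand (d : List Int) (j : Nat) : pvF (pvExpand d) j = pvF d j := by
  unfold pvF
  rw [pvIter_expand]
  exact pvStable d (Nat.lt_of_lt_of_le (by omega) (pvIter_length_ge d (j+2)))

theorem pvExpand_getD_mid (d : List Int) : (pvExpand d).getD d.length 0 = 0 := by
  simp only [pvExpand, List.append_assoc, List.getD]
  rw [List.getElem?_append_right (Nat.le_refl _)]
  simp

theorem pvExpand_getD_right (d : List Int) {j : Nat} (h1 : d.length < j) (h2 : j < 2 * d.length + 1) :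
    (pvExpand d).getD j 0 = PySem.Int.bxor (d.getD (2 * d.length - j) 0) 1 := by
  simp only [pvExpand, List.append_assoc, List.getD]
  rw [List.getElem?_append_right (show d.length ≤ j by omega)]
  rw [List.getElem?_append_right (show ([(0:Int)]).length ≤ j - d.length by simp; omega)]
  have hrev : j - d.length - [(0:Int)].length < d.reverse.length := by simp; omega
  rw [List.getElem?_map, List.getElem?_eq_getElem hrev]
  rw [List.getElem_reverse]
  have : d.length - 1 - (j - d.length - [(0:Int)].length) = 2 * d.length - j := by
    simp; omega
  simp only [this]
  simp [List.getElem?_eq_getElem (show 2 * d.length - j < d.length by omega)]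

theorem pvBxor_one_one (x : Int) : PySem.Int.bxor (PySem.Int.bxor x 1) 1 = x := by
  unfold PySem.Int.bxor
  split_ifs <;> simp_all <;> omega

theorem pvBxor_zero_left (p : Int) : PySem.Int.bxor 0 p = p := by
  rw [PySem.Int.bxor_comm]; exact PySem.Int.bxor_zero p

-- the positional descent computes the stable expansion value, xor the parity (parity ∈ {0,1})
theorem pvBit_correct (d : List Int) (k : Nat) :
    ∀ j p, (p = 0 ∨ p = 1) → j < (pvIter d k).length →
      pvBit d k (pvIter d k).length j p = PySem.Int.bxor (pvF d j) p := by
  induction k with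
  | zero =>
    intro j p _ hj
    have h0 : d.getD j 0 = pvF d j := pvStable d (k := 0) hj
    simp only [pvBit, h0]
  | succ k ih =>
    intro j p hp hj
    have hm : (pvIter d (k+1)).length = 2 * (pvIter d k).length + 1 := by
      simp [pvIter, pvExpand_length]
    set m := (pvIter d k).length with hmdef
    have hdiv : ((pvIter d (k+1)).length - 1) / 2 = m := by omega
    rw [show pvBit d (k+1) (pvIter d (k+1)).length j p =
        (if j = ((pvIter d (k+1)).length - 1) / 2 then p
         else if ((pvIter d (k+1)).length - 1) / 2 < j then
           pvBit d k (((pvIter d (k+1)).length - 1) / 2)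
             (2 * (((pvIter d (k+1)).length - 1) / 2) - j) (PySem.Int.bxor p 1)
         else pvBit d k (((pvIter d (k+1)).length - 1) / 2) j p) from rfl]
    rw [hdiv]
    by_cases hjm : j = m
    · rw [if_pos hjm]
      have h0 : pvF d j = 0 := by
        rw [← pvStable d (k := k+1) hj]
        show (pvExpand (pvIter d k)).getD j 0 = 0
        rw [hjm]; exact pvExpand_getD_mid _
      rw [h0, pvBxor_zero_left]
    · rw [if_neg hjm]
      by_cases hlt : m < j
      · rw [if_pos hlt]
        have hj2 : 2 * m - j < m := by omega
        have hfj : pvF d j = PySem.Int.bxor (pvF d (2 * m - j)) 1 := by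
          rw [← pvStable d (k := k+1) hj]
          show (pvExpand (pvIter d k)).getD j 0 = _
          rw [pvExpand_getD_right _ hlt (by omega), pvStable d (k := k) hj2]
        have hp' : PySem.Int.bxor p 1 = 0 ∨ PySem.Int.bxor p 1 = 1 := by
          rcases hp with h | h <;> subst h
          · right; decide
          · left; decide
        rw [ih _ _ hp' hj2, hfj]
        rcases hp with h | h <;> subst h
        · rw [show PySem.Int.bxor (0:Int) 1 = 1 from by decide, PySem.Int.bxor_zero]
        · rw [show PySem.Int.bxor (1:Int) 1 = 0 from by decide, PySem.Int.bxor_zero,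
            pvBxor_one_one]
      · rw [if_neg hlt]
        exact ih _ _ hp (by omega)

-- pvFindKS lands on an iterate length that exceeds i
theorem pvFindKS_correct (d : List Int) (i : Nat) :
    ∀ t k, i + 1 - k ≤ t →
      ∃ k', pvFindKS i k (pvIter d k).length = (k', (pvIter d k').length) ∧ i < (pvIter d k').length := by
  intro t
  induction t with
  | zero =>
    intro k hk
    have : ¬ (pvIter d k).length ≤ i := by
      have := pvIter_length_ge d k; omega
    rw [pvFindKS, if_neg this]
    exact ⟨k, rfl, by omega⟩
  | succ t ih =>
    intro k hk
    by_cases h : (pvIter d k).length ≤ i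
    · rw [pvFindKS, if_pos h]
      have hk' : i + 1 - (k + 1) ≤ t := by
        have := pvIter_length_ge d k; omega
      have h2 : 2 * (pvIter d k).length + 1 = (pvIter d (k+1)).length := by
        simp [pvIter, pvExpand_length]
      rw [h2]
      exact ih (k+1) hk'
    · rw [pvFindKS, if_neg h]
      exact ⟨k, rfl, by omega⟩

-- B is the per-index stable value, for every goal
theorem pvAlt_eq (data : List Int) (goal : Int) :
    fill_disk_alt data goal = (List.range goal.toNat).map (fun i => pvF data i) := by
  unfold fill_disk_alt
  refine List.map_congr_left ?_
  intro i _
  obtain ⟨k', hks, hlt⟩ := pvFindKS_correct data i (i + 1) 0 (by omega)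
  show (let ks := pvFindKS i 0 data.length; pvBit data ks.1 ks.2 i 0) = _
  rw [show data.length = (pvIter data 0).length from rfl, hks]
  simpa using pvBit_correct data k' i 0 (Or.inl rfl) hlt

-- the truncated expansion, element by element
theorem pvTake_eq (data : List Int) (goal : Int) (hg : 0 < goal)
    (hle : goal ≤ ((pvExpand data).length : Int)) :
    PySem.List.slice (pvExpand data) none (some goal) = (List.range goal.toNat).map (fun i => pvF data i) := by
  rw [PySem.List.slice_to _ (by omega)]
  have hglen : goal.toNat ≤ (pvExpand data).length := by omega
  apply List.ext_getElem
  · simp [hglen]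
  · intro i h1 h2
    have hiL : i < (pvIter data 1).length := by
      show i < (pvExpand data).length
      simp at h1; omega
    simp only [List.getElem_take, List.getElem_map, List.getElem_range]
    have hst := pvStable data (k := 1) hiL
    show (pvIter data 1)[i] = pvF data i
    rw [← hst]
    simp [List.getD, List.getElem?_eq_getElem hiL]

-- A is the same per-index stable value, for positive goal
theorem pvA_eq (data : List Int) (goal : Int) (hg : 0 < goal) :
    ∀ t, (goal - data.length).toNat ≤ t →
      fill_disk data goal = (List.range goal.toNat).map (fun i => pvF data i) := by
  intro t
  induction t generalizing data with
  | zero =>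
    intro ht
    have hle : goal ≤ ((pvExpand data).length : Int) := by
      rw [pvExpand_length]; push_cast; omega
    rw [fill_disk, if_pos hle]
    exact pvTake_eq data goal hg hle
  | succ t ih =>
    intro ht
    rw [fill_disk]
    by_cases h : goal ≤ ((pvExpand data).length : Int)
    · rw [if_pos h]
      exact pvTake_eq data goal hg h
    · rw [if_neg h]
      have ht' : (goal - (pvExpand data).length).toNat ≤ t := by
        rw [pvExpand_length] at h ⊢; push_cast at h ⊢; omega
      rw [ih (pvExpand data) ht']
      exact List.map_congr_left (fun i _ => pvF_expand data i)

-- ===== VERDICT (by name: the statement is the Claim_ definition above) =====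
theorem fill_disk_spec : Claim_unchanged_fill_disk := by
  intro data goal _ hnd
  show fill_disk data goal = fill_disk_alt data goal
  rcases Int.lt_or_le 0 goal with hg | hg
  · rw [pvA_eq data goal hg _ (Nat.le_refl _), pvAlt_eq]
  · have hB : fill_disk_alt data goal = [] := by
      rw [pvAlt_eq]
      simp [Int.toNat_of_nonpos hg]
    rw [hB, fill_disk, if_pos (by rw [pvExpand_length]; push_cast; omega)]
    rcases Int.lt_or_le goal 0 with hneg | hzero
    · have hnd' : 2 * (data.length : Int) + 1 + goal ≤ 0 := by
        unfold D_fill_disk at hnd; push Not at hnd; exact hnd hneg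
      have hk : 0 < (-goal).toNat := by omega
      rw [show goal = -(((-goal).toNat : Nat) : Int) by omega]
      rw [PySem.List.slice_to_neg_natCast _ _ hk]
      rw [List.take_eq_nil_iff.mpr (Or.inl (by rw [pvExpand_length]; omega))]
    · have h0 : goal = 0 := by omega
      subst h0
      rw [PySem.List.slice_to _ (by omega)]
      simp

theorem fill_disk_changed : Claim_changed_fill_disk := by
  unfold Claim_changed_fill_disk
  refine ⟨by decide, by decide, ?_, by decide, by decide⟩
  show fill_disk [1] (-1) = [1, 0]
  rw [fill_disk]
  decide

theorem fill_disk_tight : Claim_exact_fill_disk := by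
  intro data goal _ hd
  obtain ⟨hneg, hlen⟩ := hd
  have hB : fill_disk_alt data goal = [] := by
    rw [pvAlt_eq]
    simp [Int.toNat_of_nonpos (by omega : goal ≤ 0)]
  rw [hB, fill_disk, if_pos (by rw [pvExpand_length]; push_cast; omega)]
  have hk : 0 < (-goal).toNat := by omega
  rw [show goal = -(((-goal).toNat : Nat) : Int) by omega]
  rw [PySem.List.slice_to_neg_natCast _ _ hk]
  intro hnil
  rw [List.take_eq_nil_iff] at hnil
  rcases hnil with h | h
  · rw [pvExpand_length] at h; omega
  · have hl := congrArg List.length h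
    rw [pvExpand_length] at hl
    simp at hl
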